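-- pv_equiv track=rewrite | github.com/zachpek/CS1010E | ET_06_T27.py | up_adj_strR
-- ===== SOURCE A (Python) =====
-- def up_adj_strR(tup):
--     less = tup[0] < tup[1]
--     if len(tup) == 2:
--         return ((tup[0], tup[1]),) if less \
--             else ()
--     next_tup = up_adj_strR(tup[1:])
--     if less:
--         return (tup[:2],) + next_tup
--     return next_tup
-- ===== SOURCE B (Python) =====
-- def up_adj_strR(tup):
--     return tuple((a, b) for a, b in zip(tup, tup[1:]) if a < b)
-- ===== Notes on version B (the rewrite author's own statement) =====
-- stated objective: faster
-- what changed: Replaced the recursion that re-slices the tuple at every step with a single linear pass over zipped adjacent pairs.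
-- crash fix: On tuples of length < 2 A raises IndexError (tup[0]/tup[1]); B returns the empty tuple. — e.g. on up_adj_strR([]): A raises IndexError, B returns []
import Mathlib
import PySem

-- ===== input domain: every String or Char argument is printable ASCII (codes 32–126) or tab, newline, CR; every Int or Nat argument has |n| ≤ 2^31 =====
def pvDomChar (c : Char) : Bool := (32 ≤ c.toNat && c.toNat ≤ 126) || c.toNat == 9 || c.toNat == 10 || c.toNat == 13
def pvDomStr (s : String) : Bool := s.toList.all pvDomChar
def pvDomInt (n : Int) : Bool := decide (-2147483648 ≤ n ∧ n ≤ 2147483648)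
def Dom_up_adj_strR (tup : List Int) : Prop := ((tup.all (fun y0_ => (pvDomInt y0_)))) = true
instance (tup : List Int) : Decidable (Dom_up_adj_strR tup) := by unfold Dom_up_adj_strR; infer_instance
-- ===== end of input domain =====

-- B replaces A's O(n^2) tuple-reslicing recursion with one linear pass over zipped adjacent pairs (faster, asymptotic).


-- ===== PORT A =====
-- Literal port of A's recursion: less := tup[0] < tup[1]; base case when len == 2;
-- otherwise recurse on tup[1:]. The `_ => []` arm is unreachable inside Pre_ (A raises IndexError there).
def up_adj_strR : List Int → List (List Int)
  | a :: b :: rest =>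
      let less := a < b
      if (a :: b :: rest).length == 2 then
        if less then [[a, b]] else []
      else
        let next_tup := up_adj_strR (b :: rest)
        if less then [a, b] :: next_tup else next_tup
  | _ => []

-- ===== PORT B =====
-- Port of B: filter-and-collect zip(tup, tup[1:]) (empty for lists shorter than 2).
def up_adj_strR_alt (tup : List Int) : List (List Int) :=
  ((tup.zip (tup.drop 1)).filter (fun p => p.1 < p.2)).map (fun p => [p.1, p.2])

-- ===== PRECONDITION & SPEC =====
-- Pre_ excludes tuples of length < 2, on which A raises IndexError.
def Pre_up_adj_strR (tup : List Int) : Prop := 2 ≤ tup.length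
instance (tup : List Int) : Decidable (Pre_up_adj_strR tup) := by unfold Pre_up_adj_strR; infer_instance
def pvWitness_up_adj_strR : List Int := [1, 3, 2]

-- On tuples of length < 2 A raises IndexError (tup[0]/tup[1]); B returns the empty tuple.
def Raises_up_adj_strR (tup : List Int) : Prop := tup.length < 2
instance (tup : List Int) : Decidable (Raises_up_adj_strR tup) := by unfold Raises_up_adj_strR; infer_instance
def pvRaiseWitness_up_adj_strR : List Int := []
def pvRaiseWitnessOut_up_adj_strR : List (List Int) := []

def Spec_up_adj_strR (tup : List Int) (out : List (List Int)) : Prop := out = up_adj_strR_alt tup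
instance (tup : List Int) (out : List (List Int)) : Decidable (Spec_up_adj_strR tup out) := by unfold Spec_up_adj_strR; infer_instance

-- ===== CLAIM (what is proved, stated in full; the proofs are below) =====
def Claim_equal_up_adj_strR : Prop := ∀ (tup : List Int), Dom_up_adj_strR tup → Pre_up_adj_strR tup → Spec_up_adj_strR tup (up_adj_strR tup)
def Claim_raises_up_adj_strR : Prop := (∀ (tup : List Int), Dom_up_adj_strR tup → Raises_up_adj_strR tup → ¬ Pre_up_adj_strR tup) ∧ (Dom_up_adj_strR (pvRaiseWitness_up_adj_strR) ∧ Raises_up_adj_strR (pvRaiseWitness_up_adj_strR) ∧ up_adj_strR_alt (pvRaiseWitness_up_adj_strR) = pvRaiseWitnessOut_up_adj_strR)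

-- ===== LEMMAS AND PROOFS =====

-- B unrolled one step on a list with at least two elements.
theorem alt_cons_cons (a b : Int) (rest : List Int) :
    up_adj_strR_alt (a :: b :: rest) =
      (if a < b then [[a, b]] else []) ++ up_adj_strR_alt (b :: rest) := by
  by_cases hab : a < b <;>
    cases rest <;>
      simp [up_adj_strR_alt, List.filter_cons, hab]

theorem key (rest : List Int) : ∀ (a b : Int),
    up_adj_strR (a :: b :: rest) = up_adj_strR_alt (a :: b :: rest) := by
  induction rest with
  | nil =>
      intro a b
      by_cases hab : a < b <;> simp [up_adj_strR, up_adj_strR_alt, hab]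
  | cons c rest ih =>
      intro a b
      rw [alt_cons_cons, ← ih b c]
      simp only [up_adj_strR, List.length_cons]
      split_ifs with h h' <;> simp_all

-- ===== VERDICT (by name: the statement is the Claim_ definition above) =====
theorem up_adj_strR_spec : Claim_equal_up_adj_strR := by
  intro tup _ hpre
  unfold Spec_up_adj_strR
  match tup with
  | a :: b :: rest => exact key rest a b
  | [] | [_] => simp [Pre_up_adj_strR] at hpre

@[simp] theorem up_adj_strR_raises : Claim_raises_up_adj_strR := by
  unfold Claim_raises_up_adj_strR
  exact ⟨fun tup _ hr hp => by unfold Raises_up_adj_strR at hr; unfold Pre_up_adj_strR at hp; omega,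
    by decide⟩
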